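-- pv_equiv track=rewrite | github.com/jamiewannenburg/pyp9m4 | pyp9m4/parsers/mace4.py | extract_interpretation_blocks
-- ===== SOURCE A (Python) =====
-- _INTERP_NEEDLE = "interpretation("
--
-- _LEN_INTERP_BEFORE_LPAREN = len("interpretation")
--
-- def _matching_close_paren(s: str, open_paren_idx: int) -> int | None:
--     """Index of the ``)`` matching ``(`` at ``open_paren_idx``, or ``None`` if EOF leaves unclosed parens."""
--     assert s[open_paren_idx] == "("
--     depth = 0
--     i = open_paren_idx
--     while i < len(s):
--         c = s[i]
--         if c == "(":
--             depth += 1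
--         elif c == ")":
--             depth -= 1
--             if depth == 0:
--                 return i
--         i += 1
--     return None
--
-- def _try_extract_next_interpretation(s: str, pos: int = 0) -> tuple[str, int] | None:
--     """Next complete ``interpretation(...)`` starting at or after ``pos``, or ``None`` if none is complete yet."""
--     while True:
--         i = s.find(_INTERP_NEEDLE, pos)
--         if i < 0:
--             return None
--         open_paren = i + _LEN_INTERP_BEFORE_LPAREN
--         if open_paren >= len(s) or s[open_paren] != "(":
--             pos = i + 1
--             continue
--         close = _matching_close_paren(s, open_paren)
--         if close is None:
--             return None
--         end = close + 1
--         # LADR term reader expects a terminating period after the interpretation term.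
--         # Mace4 prints it as `interpretation(...).`, but our balanced-paren scan would
--         # otherwise stop at `)` and drop the dot.
--         if end < len(s) and s[end] == ".":
--             end += 1
--         return (s[i:end], end)
--
-- def extract_interpretation_blocks(text: str) -> tuple[str, ...]:
--     """Return each complete ``interpretation(...)`` term substring.
--
--     If Mace4 printed a terminating period (i.e. `interpretation(...).`), include it too.
--
--     Only balanced blocks are returned; a trailing incomplete ``interpretation(``… is ignored
--     until closed (e.g. when using :class:`Mace4InterpretationBuffer` across chunks).
--     """
--     out: list[str] = []
--     pos = 0
--     while True:
--         got = _try_extract_next_interpretation(text, pos)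
--         if got is None:
--             break
--         block, pos = got
--         out.append(block)
--     return tuple(out)
-- ===== SOURCE B (Python) =====
-- def extract_interpretation_blocks(text: str) -> tuple[str, ...]:
--     """Two staged passes: a stack pass precomputes the matching close paren of
--     every open paren into a table, then extraction walks needle occurrences
--     with plain table lookups (no per-block depth re-scan)."""
--     # pass 1: match[o] = index of the ')' closing the '(' at o, via a stack
--     match = {}
--     stack = []
--     for j, c in enumerate(text):
--         if c == "(":
--             stack.append(j)
--         elif c == ")":
--             if stack:
--                 match[stack.pop()] = j
--     # pass 2: jump between complete blocks using the table
--     out = []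
--     i = 0
--     n = len(text)
--     while True:
--         i = text.find("interpretation(", i)
--         if i < 0:
--             break
--         o = i + 14  # the '(' of the needle
--         if o not in match:
--             break  # unclosed final block: dropped
--         end = match[o] + 1
--         if end < n and text[end] == ".":
--             end += 1
--         out.append(text[i:end])
--         i = end
--     return tuple(out)
-- ===== Notes on version B (the rewrite author's own statement) =====
-- stated objective: alternative
-- what changed: A re-scans forward from each needle with a local depth counter to find the matching close paren; B instead makes one stack-based pass over the whole text that precomputes a table mapping every open paren to its matching close, then extracts blocks by mere table lookups at the needle occurrences.
import Mathlib
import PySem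

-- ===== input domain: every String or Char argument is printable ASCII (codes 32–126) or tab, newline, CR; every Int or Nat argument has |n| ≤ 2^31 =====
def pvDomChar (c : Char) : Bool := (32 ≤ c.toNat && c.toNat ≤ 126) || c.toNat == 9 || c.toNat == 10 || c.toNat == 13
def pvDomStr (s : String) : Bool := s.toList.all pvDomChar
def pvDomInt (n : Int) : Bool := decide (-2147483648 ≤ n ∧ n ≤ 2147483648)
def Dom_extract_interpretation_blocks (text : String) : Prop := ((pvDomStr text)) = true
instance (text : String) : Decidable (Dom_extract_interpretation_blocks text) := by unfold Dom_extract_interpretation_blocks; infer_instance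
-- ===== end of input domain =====

-- B replaces A's per-block depth re-scan (a matching-close-paren helper called from each needle
-- occurrence) by a one-pass stack that precomputes the matching close of EVERY open paren into a
-- table, then extracts blocks by table lookups (objective: alternative algorithm, same cost).
-- Loops are ported as structural recursion (on the remaining list for pass 1, on a fuel bound
-- covering the loop's iterations for the while loops).

-- ===== PORT A =====

-- module constant _INTERP_NEEDLE
def pvNeedle : List Char := "interpretation(".toList

-- helper _matching_close_paren: loop from the open paren with a depth counter (the assert is a no-op);
-- fuel = s.length - i bounds the `while i < len(s)` loop exactly (fuel 0 coincides with i ≥ len: return None)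
def matchCloseGo (s : List Char) (depth : Int) (i : Nat) : Nat → Option Nat
  | 0 => none
  | fuel + 1 =>
    if h : i < s.length then
      if s[i] = '(' then matchCloseGo s (depth + 1) (i + 1) fuel
      else if s[i] = ')' then
        (if depth - 1 = 0 then some i else matchCloseGo s (depth - 1) (i + 1) fuel)
      else matchCloseGo s depth (i + 1) fuel
    else none

-- helper _try_extract_next_interpretation (the `while True` / `continue` loop is the recursion on fuel;
-- pos grows by ≥ 1 per round and find fails beyond s.length, so s.length + 1 rounds always suffice)
def tryExtract (s : List Char) (pos : Nat) : Nat → Option (List Char × Nat)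
  | 0 => none
  | fuel + 1 =>
    if PySem.Chars.findFrom s pvNeedle (pos : Int) none < 0 then none
    else if (PySem.Chars.findFrom s pvNeedle (pos : Int) none).toNat + 14 ≥ s.length ∨
        ¬ (s[(PySem.Chars.findFrom s pvNeedle (pos : Int) none).toNat + 14]? = some '(') then
      tryExtract s ((PySem.Chars.findFrom s pvNeedle (pos : Int) none).toNat + 1) fuel
    else
      match matchCloseGo s 0 ((PySem.Chars.findFrom s pvNeedle (pos : Int) none).toNat + 14)
          (s.length - ((PySem.Chars.findFrom s pvNeedle (pos : Int) none).toNat + 14)) with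
      | none => none
      | some close =>
        some (PySem.List.slice s (some ((PySem.Chars.findFrom s pvNeedle (pos : Int) none).toNat : Int))
                (some ((if close + 1 < s.length ∧ s[close + 1]? = some '.' then close + 2 else close + 1) : Int)),
              if close + 1 < s.length ∧ s[close + 1]? = some '.' then close + 2 else close + 1)

-- the `while True` loop of extract_interpretation_blocks, with the accumulating out list;
-- pos strictly increases per appended block, so s.length + 1 iterations always suffice
def loopA (s : List Char) (pos : Nat) (acc : List (List Char)) : Nat → List (List Char)
  | 0 => acc
  | fuel + 1 =>
    match tryExtract s pos (s.length + 1) with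
    | none => acc
    | some (b, e) => loopA s e (acc ++ [b]) fuel

def extract_interpretation_blocks (text : String) : List String :=
  (loopA text.toList 0 [] (text.toList.length + 1)).map (fun l => String.ofList l)

-- ===== PORT B =====

-- B's pass 1: `for j, c in enumerate(text)` with a stack of open-paren indices (head = top of the
-- python list) and the match dict; structural recursion on the remaining characters, j = index of head
def pass1 : List Char → Nat → List Nat → PySem.Dict Nat Nat → PySem.Dict Nat Nat
  | [], _, _, d => d
  | c :: l, j, st, d =>
    if c = '(' then pass1 l (j + 1) (j :: st) d
    else if c = ')' then
      match st with
      | [] => pass1 l (j + 1) [] d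
      | t :: st' => pass1 l (j + 1) st' (d.insert t j)
    else pass1 l (j + 1) st d

-- B's pass 2: the `while True` loop walking needle occurrences via table lookups;
-- i strictly increases per appended block, so s.length + 1 iterations always suffice
def scan2 (s : List Char) (d : PySem.Dict Nat Nat) (i : Nat) (acc : List (List Char)) : Nat → List (List Char)
  | 0 => acc
  | fuel + 1 =>
    if PySem.Chars.findFrom s pvNeedle (i : Int) none < 0 then acc
    else
      match d.get? ((PySem.Chars.findFrom s pvNeedle (i : Int) none).toNat + 14) with
      | none => acc
      | some close =>
        scan2 s d (if close + 1 < s.length ∧ s[close + 1]? = some '.' then close + 1 + 1 else close + 1)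
          (acc ++ [PySem.List.slice s (some ((PySem.Chars.findFrom s pvNeedle (i : Int) none).toNat : Int))
                     (some ((if close + 1 < s.length ∧ s[close + 1]? = some '.' then close + 1 + 1 else close + 1) : Int))]) fuel

def extract_interpretation_blocks_alt (text : String) : List String :=
  (scan2 text.toList (pass1 text.toList 0 [] PySem.Dict.empty) 0 [] (text.toList.length + 1)).map
    (fun l => String.ofList l)

-- ===== PRECONDITION & SPEC =====
def Spec_extract_interpretation_blocks (text : String) (out : List String) : Prop := out = extract_interpretation_blocks_alt text
instance (text : String) (out : List String) : Decidable (Spec_extract_interpretation_blocks text out) := by unfold Spec_extract_interpretation_blocks; infer_instance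

-- ===== CLAIM (what is proved, stated in full; the proofs are below) =====
def Claim_equal_extract_interpretation_blocks : Prop := ∀ (text : String), Dom_extract_interpretation_blocks text → Spec_extract_interpretation_blocks text (extract_interpretation_blocks text)

-- ===== LEMMAS AND PROOFS =====

theorem pvFindFrom_none_of_gt (s : List Char) (pos : Nat) (h : s.length < pos) :
    PySem.Chars.findFrom s pvNeedle (pos : Int) none = -1 := by
  simp [PySem.Chars.findFrom]; omega

theorem pvFindFrom_none_of_ge (s : List Char) (pos : Nat) (h : s.length ≤ pos) :
    PySem.Chars.findFrom s pvNeedle (pos : Int) none = -1 := by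
  by_cases he : pos = s.length
  · subst he
    rw [PySem.Chars.findFrom_natCast s pvNeedle s.length (le_refl _)]
    simp [PySem.Chars.find, PySem.Chars.find.go, pvNeedle]
  · exact pvFindFrom_none_of_gt s pos (by omega)

theorem pvFindFrom_bounds (s : List Char) (pos : Nat)
    (h : ¬ PySem.Chars.findFrom s pvNeedle (pos : Int) none < 0) :
    pos ≤ (PySem.Chars.findFrom s pvNeedle (pos : Int) none).toNat ∧
      (PySem.Chars.findFrom s pvNeedle (pos : Int) none).toNat + 15 ≤ s.length ∧
      pvNeedle <+: s.drop (PySem.Chars.findFrom s pvNeedle (pos : Int) none).toNat := by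
  have hle : pos ≤ s.length := by
    by_contra hc
    rw [pvFindFrom_none_of_gt s pos (by omega)] at h
    omega
  have hne : PySem.Chars.findFrom s pvNeedle (pos : Int) none ≠ -1 := by omega
  obtain ⟨h1, h2, _⟩ := PySem.Chars.findFrom_natCast_spec s pvNeedle pos hle hne
  refine ⟨by omega, ?_, h2⟩
  have hlen : pvNeedle.length = 15 := rfl
  have hl := h2.length_le
  rw [hlen, List.length_drop] at hl
  omega

-- prefix at t gives the char at t + k
theorem pvPrefix_getElem (s : List Char) (t : Nat) (hp : pvNeedle <+: s.drop t) (k : Nat)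
    (hk : k < 15) : s[t + k]? = pvNeedle[k]? := by
  obtain ⟨r, hr⟩ := hp
  have hg : s[t + k]? = (s.drop t)[k]? := List.getElem?_drop.symm
  rw [hg, ← hr, List.getElem?_append_left (by rw [show pvNeedle.length = 15 from rfl]; omega)]

theorem pvMatchCloseGo_bounds (s : List Char) (fuel : Nat) : ∀ (depth : Int) (i c : Nat),
    matchCloseGo s depth i fuel = some c → i ≤ c ∧ c < s.length := by
  induction fuel with
  | zero => intro depth i c h; cases h
  | succ fuel ih =>
    intro depth i c h
    rw [matchCloseGo] at h
    by_cases hi : i < s.length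
    · rw [dif_pos hi] at h
      by_cases h1 : s[i] = '('
      · rw [if_pos h1] at h; have := ih _ _ _ h; omega
      · rw [if_neg h1] at h
        by_cases h2 : s[i] = ')'
        · rw [if_pos h2] at h
          by_cases hd : depth - 1 = 0
          · rw [if_pos hd] at h; cases h; omega
          · rw [if_neg hd] at h; have := ih _ _ _ h; omega
        · rw [if_neg h2] at h; have := ih _ _ _ h; omega
    · rw [dif_neg hi] at h; cases h

-- closed form of tryExtract when findFrom fails
theorem pvTryExtract_none (s : List Char) (pos fuel : Nat)
    (h : PySem.Chars.findFrom s pvNeedle (pos : Int) none < 0) :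
    tryExtract s pos (fuel + 1) = none := by
  rw [tryExtract, if_pos h]

-- closed form of tryExtract when findFrom succeeds (the s[open] ≠ '(' branch is dead: the needle ends in '(')
theorem pvTryExtract_some (s : List Char) (pos fuel : Nat)
    (h : ¬ PySem.Chars.findFrom s pvNeedle (pos : Int) none < 0) :
    tryExtract s pos (fuel + 1) =
      (match matchCloseGo s 0 ((PySem.Chars.findFrom s pvNeedle (pos : Int) none).toNat + 14)
          (s.length - ((PySem.Chars.findFrom s pvNeedle (pos : Int) none).toNat + 14)) with
        | none => none
        | some close =>
          some (PySem.List.slice s (some ((PySem.Chars.findFrom s pvNeedle (pos : Int) none).toNat : Int))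
                  (some ((if close + 1 < s.length ∧ s[close + 1]? = some '.' then close + 2 else close + 1) : Int)),
                if close + 1 < s.length ∧ s[close + 1]? = some '.' then close + 2 else close + 1)) := by
  obtain ⟨h1, h2, h3⟩ := pvFindFrom_bounds s pos h
  have hop : s[(PySem.Chars.findFrom s pvNeedle (pos : Int) none).toNat + 14]? = some '(' := by
    rw [pvPrefix_getElem s _ h3 14 (by omega)]
    decide
  rw [tryExtract, if_neg h, if_neg (by push Not; exact ⟨by omega, by simp [hop]⟩)]

-- the local depth scan of _matching_close_paren, phrased on the remaining suffix (for the induction)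
def lc : List Char → Nat → Int → Option Nat
  | [], _, _ => none
  | c :: l, k, depth =>
    if c = '(' then lc l (k + 1) (depth + 1)
    else if c = ')' then (if depth - 1 = 0 then some k else lc l (k + 1) (depth - 1))
    else lc l (k + 1) depth

-- matchCloseGo with exact fuel is the suffix scan lc
theorem pvMatchClose_eq_lc (s : List Char) : ∀ (l : List Char) (i : Nat) (depth : Int),
    l = s.drop i → matchCloseGo s depth i (s.length - i) = lc l i depth := by
  intro l
  induction l with
  | nil =>
    intro i depth h
    have : s.length ≤ i := by
      by_contra hc
      have := List.drop_eq_getElem_cons (l := s) (by omega : i < s.length)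
      rw [← h] at this; cases this
    rw [show s.length - i = 0 by omega]
    rfl
  | cons c l ih =>
    intro i depth h
    have hi : i < s.length := by
      by_contra hc
      rw [List.drop_eq_nil_of_le (by omega)] at h; cases h
    have hd := List.drop_eq_getElem_cons (l := s) hi
    rw [← h] at hd
    obtain ⟨hc0, hl⟩ := List.cons.injEq .. ▸ hd
    rw [show s.length - i = (s.length - (i + 1)) + 1 by omega, matchCloseGo, dif_pos hi, lc, ← hc0]
    by_cases h1 : c = '('
    · rw [if_pos h1, if_pos h1, ih (i + 1) (depth + 1) hl]
    · rw [if_neg h1, if_neg h1]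
      by_cases h2 : c = ')'
      · rw [if_pos h2, if_pos h2]
        by_cases hd0 : depth - 1 = 0
        · rw [if_pos hd0, if_pos hd0]
        · rw [if_neg hd0, if_neg hd0, ih (i + 1) (depth - 1) hl]
      · rw [if_neg h2, if_neg h2, ih (i + 1) depth hl]

-- once a key is recorded, pass1 never touches it again (future pushes are ≥ k > o, stack is fresh)
theorem pvPass1_frozen (o v : Nat) : ∀ (l : List Char) (k : Nat) (st : List Nat)
    (d : PySem.Dict Nat Nat), o ∉ st → o < k → d.get? o = some v →
    (pass1 l k st d).get? o = some v := by
  intro l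
  induction l with
  | nil => intro k st d _ _ hv; exact hv
  | cons c l ih =>
    intro k st d hst hk hv
    simp only [pass1]
    by_cases h1 : c = '('
    · rw [if_pos h1]
      exact ih (k + 1) (k :: st) d (by simp; exact ⟨by omega, hst⟩) (by omega) hv
    · rw [if_neg h1]
      by_cases h2 : c = ')'
      · rw [if_pos h2]
        cases st with
        | nil => exact ih (k + 1) [] d (by simp) (by omega) hv
        | cons t st' =>
          have hto : o ≠ t := by intro he; exact hst (he ▸ List.mem_cons_self)
          exact ih (k + 1) st' (d.insert t k)
            (fun hm => hst (List.mem_cons_of_mem _ hm)) (by omega)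
            (by rw [PySem.Dict.get?_insert_of_ne _ _ hto]; exact hv)
      · rw [if_neg h2]
        exact ih (k + 1) st d hst (by omega) hv

-- while o sits in the stack under `us` opens, pass1's final value at o is the local scan at depth |us| + 1
theorem pvPass1_in_stack (o : Nat) : ∀ (l : List Char) (k : Nat) (us st : List Nat)
    (d : PySem.Dict Nat Nat), o ∉ us → o ∉ st → o < k → d.get? o = none →
    (pass1 l k (us ++ o :: st) d).get? o = lc l k ((us.length : Int) + 1) := by
  intro l
  induction l with
  | nil => intro k us st d _ _ _ hv; exact hv
  | cons c l ih =>
    intro k us st d hus hst hk hv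
    simp only [pass1]
    rw [lc]
    by_cases h1 : c = '('
    · rw [if_pos h1, if_pos h1]
      have := ih (k + 1) (k :: us) st d
        (by simp; exact ⟨by omega, hus⟩) hst (by omega) hv
      rw [show (k :: us : List Nat) ++ o :: st = k :: (us ++ o :: st) from rfl] at this
      refine this.trans ?_
      congr 1
    · rw [if_neg h1, if_neg h1]
      by_cases h2 : c = ')'
      · rw [if_pos h2, if_pos h2]
        cases us with
        | nil =>
          rw [if_pos (by norm_num)]
          exact pvPass1_frozen o k l (k + 1) st (d.insert o k) hst (by omega)
            (PySem.Dict.get?_insert_self _ _ _)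
        | cons u us' =>
          have huo : o ≠ u := by intro he; exact hus (he ▸ List.mem_cons_self)
          rw [if_neg (by simp; push_cast; omega)]
          have := ih (k + 1) us' st (d.insert u k)
            (fun hm => hus (List.mem_cons_of_mem _ hm)) hst (by omega)
            (by rw [PySem.Dict.get?_insert_of_ne _ _ huo]; exact hv)
          refine this.trans ?_
          congr 1
          simp only [List.length_cons]
          push_cast
          ring_nf
      · rw [if_neg h2, if_neg h2]
        exact ih (k + 1) us st d hus hst (by omega) hv

-- reaching o: before position o the key o is untouched; at o the '(' is pushed and pvPass1_in_stack applies
theorem pvPass1_reach (s : List Char) (o : Nat) (ho : o < s.length) (hoc : s[o] = '(') :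
    ∀ (l : List Char) (k : Nat) (st : List Nat) (d : PySem.Dict Nat Nat),
    l = s.drop k → k ≤ o → o ∉ st → d.get? o = none →
    (pass1 l k st d).get? o = lc (s.drop (o + 1)) (o + 1) 1 := by
  intro l
  induction l with
  | nil =>
    intro k st d h hk _ _
    have : s.length ≤ k := by
      by_contra hc
      have := List.drop_eq_getElem_cons (l := s) (by omega : k < s.length)
      rw [← h] at this; cases this
    omega
  | cons c l ih =>
    intro k st d h hk hst hv
    have hklt : k < s.length := by
      by_contra hc
      rw [List.drop_eq_nil_of_le (by omega)] at h; cases h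
    have hd := List.drop_eq_getElem_cons (l := s) hklt
    rw [← h] at hd
    obtain ⟨hc0, hl⟩ := List.cons.injEq .. ▸ hd
    by_cases hko : k = o
    · subst hko
      have hcp : c = '(' := by rw [hc0, hoc]
      simp only [pass1]
      rw [if_pos hcp]
      have := pvPass1_in_stack k l (k + 1) [] st d (by simp) hst (by omega) hv
      rw [show ([] : List Nat) ++ k :: st = k :: st from rfl] at this
      rw [this, hl]
      norm_num
    · have hko' : k < o := by omega
      simp only [pass1]
      by_cases h1 : c = '('
      · rw [if_pos h1]
        exact ih (k + 1) (k :: st) d hl (by omega)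
          (by simp; exact ⟨by omega, hst⟩) hv
      · rw [if_neg h1]
        by_cases h2 : c = ')'
        · rw [if_pos h2]
          cases st with
          | nil => exact ih (k + 1) [] d hl (by omega) (by simp) hv
          | cons t st' =>
            have hto : o ≠ t := by intro he; exact hst (he ▸ List.mem_cons_self)
            exact ih (k + 1) st' (d.insert t k) hl (by omega)
              (fun hm => hst (List.mem_cons_of_mem _ hm))
              (by rw [PySem.Dict.get?_insert_of_ne _ _ hto]; exact hv)
        · rw [if_neg h2]
          exact ih (k + 1) st d hl (by omega) hst hv

-- the stack pass's table agrees with A's local depth scan at every open paren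
theorem pvTable_eq (s : List Char) (o : Nat) (ho : o < s.length) (hoc : s[o] = '(') :
    (pass1 s 0 [] PySem.Dict.empty).get? o = matchCloseGo s 0 o (s.length - o) := by
  rw [show s.length - o = (s.length - (o + 1)) + 1 by omega, matchCloseGo, dif_pos ho,
    if_pos hoc]
  rw [show s.length - (o + 1) = s.length - (o + 1) from rfl]
  have hA : matchCloseGo s (0 + 1) (o + 1) (s.length - (o + 1)) = lc (s.drop (o + 1)) (o + 1) 1 := by
    rw [show (0 : Int) + 1 = 1 from rfl]
    exact pvMatchClose_eq_lc s (s.drop (o + 1)) (o + 1) 1 rfl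
  rw [hA]
  exact pvPass1_reach s o ho hoc s 0 [] PySem.Dict.empty rfl (by omega) (by simp)
    (PySem.Dict.get?_empty _)

-- the main loop equivalence: with any sufficient fuel on each side the two loops agree
theorem pvLoop_eq (s : List Char) : ∀ (n pos : Nat), s.length - pos ≤ n →
    ∀ (fa fb : Nat) (acc : List (List Char)), s.length - pos < fa → s.length - pos < fb →
    loopA s pos acc fa = scan2 s (pass1 s 0 [] PySem.Dict.empty) pos acc fb := by
  intro n
  induction n with
  | zero =>
    intro pos hn fa fb acc ha hb
    obtain ⟨fa', rfl⟩ : ∃ fa', fa = fa' + 1 := ⟨fa - 1, by omega⟩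
    obtain ⟨fb', rfl⟩ : ∃ fb', fb = fb' + 1 := ⟨fb - 1, by omega⟩
    have hneg : PySem.Chars.findFrom s pvNeedle (pos : Int) none < 0 := by
      rw [pvFindFrom_none_of_ge s pos (by omega)]; norm_num
    rw [scan2, if_pos hneg, loopA,
      show s.length + 1 = s.length + 1 - 1 + 1 by omega, pvTryExtract_none s pos _ hneg]
  | succ n ih =>
    intro pos hn fa fb acc ha hb
    obtain ⟨fa', rfl⟩ : ∃ fa', fa = fa' + 1 := ⟨fa - 1, by omega⟩
    obtain ⟨fb', rfl⟩ : ∃ fb', fb = fb' + 1 := ⟨fb - 1, by omega⟩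
    by_cases hneg : PySem.Chars.findFrom s pvNeedle (pos : Int) none < 0
    · rw [scan2, if_pos hneg, loopA,
        show s.length + 1 = s.length + 1 - 1 + 1 by omega, pvTryExtract_none s pos _ hneg]
    · obtain ⟨h1, h2, h3⟩ := pvFindFrom_bounds s pos hneg
      have hop? : s[(PySem.Chars.findFrom s pvNeedle (pos : Int) none).toNat + 14]? = some '(' := by
        rw [pvPrefix_getElem s _ h3 14 (by omega)]
        decide
      have holt : (PySem.Chars.findFrom s pvNeedle (pos : Int) none).toNat + 14 < s.length := by omega
      have hop : s[(PySem.Chars.findFrom s pvNeedle (pos : Int) none).toNat + 14] = '(' := by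
        have := List.getElem?_eq_getElem holt
        rw [this] at hop?
        exact Option.some.injEq .. ▸ hop?
      rw [scan2, if_neg hneg, loopA,
        show s.length + 1 = s.length + 1 - 1 + 1 by omega, pvTryExtract_some s pos _ hneg]
      rw [pvTable_eq s _ holt hop]
      cases hm : matchCloseGo s 0 ((PySem.Chars.findFrom s pvNeedle (pos : Int) none).toNat + 14)
          (s.length - ((PySem.Chars.findFrom s pvNeedle (pos : Int) none).toNat + 14)) with
      | none => rfl
      | some close =>
        obtain ⟨hcb1, hcb2⟩ := pvMatchCloseGo_bounds s _ 0 _ close hm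
        have he : (if close + 1 < s.length ∧ s[close + 1]? = some '.' then close + 1 + 1 else close + 1) =
            (if close + 1 < s.length ∧ s[close + 1]? = some '.' then close + 2 else close + 1) := by
          split <;> rfl
        simp only [he]
        exact ih (if close + 1 < s.length ∧ s[close + 1]? = some '.' then close + 2 else close + 1)
          (by split <;> omega) fa' fb' _ (by split <;> omega) (by split <;> omega)

-- ===== VERDICT (by name: the statement is the Claim_ definition above) =====
theorem extract_interpretation_blocks_spec : Claim_equal_extract_interpretation_blocks := by
  intro text _
  unfold Spec_extract_interpretation_blocks extract_interpretation_blocks extract_interpretation_blocks_alt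
  rw [pvLoop_eq text.toList text.toList.length 0 (by omega) (text.toList.length + 1)
        (text.toList.length + 1) [] (by omega) (by omega)]
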